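-- pv_equiv track=rewrite | github.com/Zheruel/advent-of-code-2026 | aoc/day02/solver.py | find_invalid_in_range_part2
-- ===== SOURCE A (Python) =====
-- def find_invalid_in_range_part2(start: int, end: int) -> set[int]:
--     """Find all invalid IDs in the given range [start, end] for part 2.
--
--     An invalid ID is a sequence repeated at least twice.
--     Uses a set to avoid double-counting numbers that match multiple patterns.
--
--     Args:
--         start: Start of range (inclusive)
--         end: End of range (inclusive)
--
--     Returns:
--         Set of all invalid IDs in the range
--     """
--     invalid_ids = set()
--
--     # Determine the range of digit counts we need to consider
--     min_digits = len(str(start))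
--     max_digits = len(str(end))
--
--     # For each possible total digit count
--     for d in range(min_digits, max_digits + 1):
--         # For each base length k that divides d, where d/k >= 2
--         for k in range(1, d // 2 + 1):
--             if d % k != 0:
--                 continue
--
--             # multiplier = (10^d - 1) / (10^k - 1)
--             # This is 1, 10...01, 100...0100...01, etc.
--             multiplier = (10**d - 1) // (10**k - 1)
--
--             # Base must be a k-digit number
--             min_base = 1 if k == 1 else 10 ** (k - 1)
--             max_base = 10**k - 1
--
--             # Find bases where start <= base * multiplier <= end
--             base_min = max(min_base, -(-start // multiplier))  # ceil division
--             base_max = min(max_base, end // multiplier)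
--
--             for base in range(base_min, base_max + 1):
--                 invalid_id = base * multiplier
--                 if start <= invalid_id <= end:
--                     invalid_ids.add(invalid_id)
--
--     return invalid_ids
-- ===== SOURCE B (Python) =====
-- def find_invalid_in_range_part2(start: int, end: int) -> set[int]:
--     """Find all invalid IDs (a digit block repeated at least twice) in [start, end]."""
--     out = set()
--     for d in range(len(str(start)), len(str(end)) + 1):
--         for k in range(1, d // 2 + 1):
--             if d % k != 0:
--                 continue
--             shift = 10 ** k
--             for base in range(1 if k == 1 else shift // 10, shift):
--                 # build the candidate by concatenating the k-digit block d//k times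
--                 num = base
--                 for _ in range(d // k - 1):
--                     num = num * shift + base
--                 if num > end:
--                     break
--                 if num >= start:
--                     out.add(num)
--     return out
-- ===== Notes on version B (the rewrite author's own statement) =====
-- stated objective: simpler
-- what changed: B drops A's repunit-multiplier formula and the ceil/floor-division base-window computation: it builds each candidate directly by concatenating the k-digit block d//k times (num = num*10**k + base) and scans the whole k-digit base range with an explicit start<=num filter and an early break once num exceeds end.
import Mathlib
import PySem

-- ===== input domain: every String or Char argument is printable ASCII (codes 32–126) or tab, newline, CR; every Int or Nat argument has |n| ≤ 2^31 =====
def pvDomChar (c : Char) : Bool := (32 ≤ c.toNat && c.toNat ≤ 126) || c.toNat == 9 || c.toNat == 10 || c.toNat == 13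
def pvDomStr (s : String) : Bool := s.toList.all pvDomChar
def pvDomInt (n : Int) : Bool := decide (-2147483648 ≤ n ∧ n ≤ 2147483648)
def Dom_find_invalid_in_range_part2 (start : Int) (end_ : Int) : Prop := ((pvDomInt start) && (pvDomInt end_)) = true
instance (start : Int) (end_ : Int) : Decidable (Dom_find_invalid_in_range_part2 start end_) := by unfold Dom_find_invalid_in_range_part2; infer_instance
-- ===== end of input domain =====

-- B replaces A's repunit-multiplier and ceil/floor-division base-window arithmetic with direct
-- digit-block concatenation plus a filtered scan with early break (objective: simpler; not faster).

-- ===== PORT A =====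
-- body of A's innermost 'for base in range(base_min, base_max+1)' loop
def pvA_base (start end_ multiplier : Int) (s : PySem.Set Int) (base : Int) : PySem.Set Int :=
  let invalid_id := base * multiplier
  if start ≤ invalid_id ∧ invalid_id ≤ end_ then PySem.Set.add s invalid_id else s

-- body of A's 'for k in range(1, d // 2 + 1)' loop
def pvA_k (start end_ d : Int) (s : PySem.Set Int) (k : Int) : PySem.Set Int :=
  if PySem.Int.mod d k ≠ 0 then s
  else
    let multiplier := PySem.Int.floordiv (10 ^ d.toNat - 1) (10 ^ k.toNat - 1)
    let min_base : Int := if k == 1 then 1 else 10 ^ (k - 1).toNat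
    let max_base : Int := 10 ^ k.toNat - 1
    let base_min := max min_base (-(PySem.Int.floordiv (-start) multiplier))
    let base_max := min max_base (PySem.Int.floordiv end_ multiplier)
    (PySem.List.pyRange base_min (base_max + 1) 1).foldl (pvA_base start end_ multiplier) s

-- body of A's 'for d in range(min_digits, max_digits + 1)' loop
def pvA_d (start end_ : Int) (s : PySem.Set Int) (d : Int) : PySem.Set Int :=
  (PySem.List.pyRange 1 (PySem.Int.floordiv d 2 + 1) 1).foldl (pvA_k start end_ d) s

def find_invalid_in_range_part2 (start : Int) (end_ : Int) : List Int :=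
  let min_digits := PySem.Str.len (PySem.Int.toStr start)
  let max_digits := PySem.Str.len (PySem.Int.toStr end_)
  (PySem.List.pyRange min_digits (max_digits + 1) 1).foldl (pvA_d start end_) PySem.Set.empty

-- ===== PORT B =====
-- 'num = base; for _ in range(d//k - 1): num = num*shift + base'
def pvB_num (shift base reps : Int) : Int :=
  (PySem.List.pyRange 0 (reps - 1) 1).foldl (fun num _ => num * shift + base) base

-- B's 'for base in range(...)' loop with its early 'break' (recursion = the loop with break)
def pvB_scan (start end_ shift reps : Int) (s : PySem.Set Int) (bases : List Int) : PySem.Set Int :=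
  match bases with
  | [] => s
  | base :: rest =>
    let num := pvB_num shift base reps
    if num > end_ then s
    else pvB_scan start end_ shift reps (if num ≥ start then PySem.Set.add s num else s) rest

-- body of B's 'for k in range(1, d // 2 + 1)' loop
def pvB_k (start end_ d : Int) (s : PySem.Set Int) (k : Int) : PySem.Set Int :=
  if PySem.Int.mod d k ≠ 0 then s
  else
    let shift : Int := 10 ^ k.toNat
    let lo : Int := if k == 1 then 1 else PySem.Int.floordiv shift 10
    pvB_scan start end_ shift (PySem.Int.floordiv d k) s (PySem.List.pyRange lo shift 1)

-- body of B's 'for d in range(len(str(start)), len(str(end)) + 1)' loop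
def pvB_d (start end_ : Int) (s : PySem.Set Int) (d : Int) : PySem.Set Int :=
  (PySem.List.pyRange 1 (PySem.Int.floordiv d 2 + 1) 1).foldl (pvB_k start end_ d) s

def find_invalid_in_range_part2_alt (start : Int) (end_ : Int) : List Int :=
  (PySem.List.pyRange (PySem.Str.len (PySem.Int.toStr start))
      (PySem.Str.len (PySem.Int.toStr end_) + 1) 1).foldl (pvB_d start end_) PySem.Set.empty

-- ===== PRECONDITION & SPEC =====
def Spec_find_invalid_in_range_part2 (start : Int) (end_ : Int) (out : List Int) : Prop := out = find_invalid_in_range_part2_alt start end_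
instance (start : Int) (end_ : Int) (out : List Int) : Decidable (Spec_find_invalid_in_range_part2 start end_ out) := by unfold Spec_find_invalid_in_range_part2; infer_instance

-- ===== CLAIM (what is proved, stated in full; the proofs are below) =====
def Claim_equal_find_invalid_in_range_part2 : Prop := ∀ (start : Int) (end_ : Int), Dom_find_invalid_in_range_part2 start end_ → Spec_find_invalid_in_range_part2 start end_ (find_invalid_in_range_part2 start end_)

-- ===== LEMMAS AND PROOFS =====

-- gsum r sh = 1 + sh + … + sh^(r-1)
def pvGsum : Nat → Int → Int
  | 0, _ => 0
  | r + 1, sh => pvGsum r sh * sh + 1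

theorem pvGsum_succ_high (r : Nat) (sh : Int) : pvGsum (r + 1) sh = sh ^ r + pvGsum r sh := by
  induction r with
  | zero => simp [pvGsum]
  | succ n ih =>
    have ih' : pvGsum n sh * sh + 1 = sh ^ n + pvGsum n sh := by rw [← ih]; rfl
    rw [show pvGsum (n+1+1) sh = pvGsum (n+1) sh * sh + 1 from rfl, ih, pow_succ]
    nlinarith [ih']

theorem pvGsum_mul (r : Nat) (sh : Int) : (sh - 1) * pvGsum r sh = sh ^ r - 1 := by
  induction r with
  | zero => simp [pvGsum]
  | succ n ih =>
    rw [show pvGsum (n+1) sh = pvGsum n sh * sh + 1 from rfl, pow_succ]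
    linear_combination sh * ih

theorem pvGsum_ge (r : Nat) (sh : Int) (hr : 2 ≤ r) (hsh : 10 ≤ sh) : 11 ≤ pvGsum r sh := by
  induction r with
  | zero => omega
  | succ n ih =>
    rcases Nat.lt_or_ge n 2 with h | h
    · have hn1 : n = 1 := by omega
      subst hn1
      rw [show pvGsum 2 sh = (pvGsum 1 sh) * sh + 1 from rfl,
          show pvGsum 1 sh = pvGsum 0 sh * sh + 1 from rfl, show pvGsum 0 sh = 0 from rfl]
      nlinarith
    · have h1 := ih h
      rw [show pvGsum (n+1) sh = pvGsum n sh * sh + 1 from rfl]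
      nlinarith

theorem pv_foldl_const (sh b : Int) : ∀ (l : List Int) (acc : Int),
    l.foldl (fun n _ => n * sh + b) acc = acc * sh ^ l.length + b * pvGsum l.length sh := by
  intro l
  induction l with
  | nil => intro acc; simp [pvGsum]
  | cons x xs ih =>
    intro acc
    simp only [List.foldl_cons, List.length_cons, ih, pow_succ, pvGsum_succ_high]
    ring

theorem pvB_num_eq (sh b r : Int) (hr : 1 ≤ r) : pvB_num sh b r = b * pvGsum r.toNat sh := by
  unfold pvB_num
  rw [pv_foldl_const, PySem.List.length_pyRange_one]
  have h2 : r.toNat = (r - 1 - 0).toNat + 1 := by omega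
  rw [h2, pvGsum_succ_high]
  ring

theorem pv_scan_eq (start end_ sh r m c fl : Int) (hr : 1 ≤ r)
    (hm : pvGsum r.toNat sh = m)
    (hc : ∀ b : Int, c ≤ b ↔ start ≤ b * m) (hf : ∀ b : Int, b ≤ fl ↔ b * m ≤ end_) :
    ∀ (n : Nat) (lo hi : Int), (hi - lo).toNat = n → ∀ s : PySem.Set Int,
      pvB_scan start end_ sh r s (PySem.List.pyRange lo hi 1)
        = (PySem.List.pyRange (max lo c) (min hi (fl + 1)) 1).foldl
            (fun s b => PySem.Set.add s (b * m)) s := by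
  intro n
  induction n with
  | zero =>
    intro lo hi hn s
    rw [PySem.List.pyRange_one_eq_nil (by omega), PySem.List.pyRange_one_eq_nil (by omega)]
    rfl
  | succ n ih =>
    intro lo hi hn s
    have hlt : lo < hi := by omega
    rw [PySem.List.pyRange_one_cons hlt]
    show (let num := pvB_num sh lo r;
          if num > end_ then s
          else pvB_scan start end_ sh r (if num ≥ start then PySem.Set.add s num else s)
                 (PySem.List.pyRange (lo + 1) hi 1)) = _
    simp only [pvB_num_eq sh lo r hr, hm]
    by_cases hbig : lo * m > end_
    · rw [if_pos hbig]
      have hnle : ¬ lo ≤ fl := fun h => hbig.not_ge ((hf lo).mp h)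
      rw [PySem.List.pyRange_one_eq_nil (by omega)]
      rfl
    · rw [if_neg hbig]
      have hlofl : lo ≤ fl := (hf lo).mpr (by omega)
      by_cases hcl : c ≤ lo
      · rw [if_pos ((hc lo).mp hcl)]
        have hmax : max lo c = lo := by omega
        have hmax' : max (lo + 1) c = lo + 1 := by omega
        have hcons : PySem.List.pyRange lo (min hi (fl + 1)) 1
            = lo :: PySem.List.pyRange (lo + 1) (min hi (fl + 1)) 1 :=
          PySem.List.pyRange_one_cons (by omega)
        rw [ih (lo + 1) hi (by omega), hmax, hcons, List.foldl_cons, hmax']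
      · rw [if_neg (fun h => hcl ((hc lo).mpr h))]
        have hmax : max lo c = c := by omega
        have hmax' : max (lo + 1) c = c := by omega
        rw [ih (lo + 1) hi (by omega), hmax, hmax']

theorem pv_k_core (start end_ sh r m lo : Int) (hr : 1 ≤ r) (hm : pvGsum r.toNat sh = m)
    (hm11 : 11 ≤ m) (s : PySem.Set Int) :
    (PySem.List.pyRange (max lo (-(PySem.Int.floordiv (-start) m)))
        (min (sh - 1) (PySem.Int.floordiv end_ m) + 1) 1).foldl (pvA_base start end_ m) s
      = pvB_scan start end_ sh r s (PySem.List.pyRange lo sh 1) := by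
  set c : Int := -(PySem.Int.floordiv (-start) m) with hcdef
  set fl : Int := PySem.Int.floordiv end_ m with hfldef
  have hcbr : (c - 1) * m < start ∧ start ≤ c * m :=
    (PySem.Int.neg_floordiv_neg_eq_iff_of_pos (by omega)).mp hcdef.symm
  have hc : ∀ b : Int, c ≤ b ↔ start ≤ b * m := by
    intro b
    constructor
    · intro h; nlinarith [hcbr.2]
    · intro h
      by_contra hlt
      have hb : b ≤ c - 1 := by omega
      nlinarith [hcbr.1]
  have hf : ∀ b : Int, b ≤ fl ↔ b * m ≤ end_ := by
    intro b; rw [hfldef]; exact PySem.Int.le_floordiv_iff_mul_le (by omega)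
  have hrange : min (sh - 1) fl + 1 = min sh (fl + 1) := by omega
  rw [pv_scan_eq start end_ sh r m c fl hr hm hc hf (sh - lo).toNat lo sh rfl s, hrange]
  refine PySem.List.foldl_congr_mem _ _ _ _ ?_
  intro acc x hx
  rw [PySem.List.mem_pyRange_one] at hx
  unfold pvA_base
  rw [if_pos ⟨(hc x).mp (by omega), (hf x).mp (by omega)⟩]

theorem pv_k_eq (start end_ d k : Int) (hk : 1 ≤ k) (hk2 : k ≤ PySem.Int.floordiv d 2) :
    ∀ s : PySem.Set Int, pvA_k start end_ d s k = pvB_k start end_ d s k := by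
  intro s
  by_cases hmod : PySem.Int.mod d k = 0
  case neg => simp [pvA_k, pvB_k, hmod]
  have hcond : ¬ (PySem.Int.mod d k ≠ 0) := by simp [hmod]
  -- divisibility facts
  have h2k : k * 2 ≤ d := (PySem.Int.le_floordiv_iff_mul_le (by omega)).mp hk2
  have hdr : PySem.Int.floordiv d k * k = d := by
    have := PySem.Int.floordiv_mul_add_mod d k
    omega
  have hr2 : 2 ≤ PySem.Int.floordiv d k := by
    by_contra h
    push Not at h
    have h3 : PySem.Int.floordiv d k * k ≤ 1 * k :=
      mul_le_mul_of_nonneg_right (by omega) (by omega)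
    omega
  obtain ⟨j, hj⟩ : ∃ j, k.toNat = j + 1 := ⟨k.toNat - 1, by omega⟩
  have hj1 : (1 : Int) ≤ 10 ^ j := one_le_pow₀ (by norm_num)
  have hsh10 : (10 : Int) ≤ 10 ^ k.toNat := by
    rw [hj, pow_succ]; nlinarith
  have hpow : (10 : Int) ^ d.toNat = (10 ^ k.toNat) ^ (PySem.Int.floordiv d k).toNat := by
    have hdt : d.toNat = k.toNat * (PySem.Int.floordiv d k).toNat := by
      have hcast : (↑(k.toNat * (PySem.Int.floordiv d k).toNat) : Int) = d := by
        push_cast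
        rw [Int.toNat_of_nonneg (by omega), Int.toNat_of_nonneg (by omega), mul_comm]
        exact hdr
      omega
    rw [hdt, pow_mul]
  have hm : pvGsum (PySem.Int.floordiv d k).toNat (10 ^ k.toNat)
      = PySem.Int.floordiv (10 ^ d.toNat - 1) (10 ^ k.toNat - 1) := by
    have h1 : (10 : Int) ^ d.toNat - 1
        = (10 ^ k.toNat - 1) * pvGsum (PySem.Int.floordiv d k).toNat (10 ^ k.toNat) := by
      rw [hpow, pvGsum_mul]
    rw [h1, PySem.Int.floordiv_eq_ediv_of_pos (show (0 : Int) < 10 ^ k.toNat - 1 by omega),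
        Int.mul_ediv_cancel_left _ (by omega)]
  have hm11 : 11 ≤ PySem.Int.floordiv (10 ^ d.toNat - 1) (10 ^ k.toNat - 1) := by
    rw [← hm]; exact pvGsum_ge _ _ (by omega) hsh10
  have hminbase : (if k == 1 then (1 : Int) else 10 ^ (k - 1).toNat)
      = (if k == 1 then (1 : Int) else PySem.Int.floordiv (10 ^ k.toNat) 10) := by
    rcases eq_or_ne k 1 with hb | hb
    · subst hb; rfl
    · have hbeq : (k == 1) = false := beq_eq_false_iff_ne.mpr hb
      rw [hbeq]
      simp only [Bool.false_eq_true, if_false]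
      rw [PySem.Int.floordiv_eq_ediv_of_pos (show (0 : Int) < 10 by norm_num), hj, pow_succ,
          Int.mul_ediv_cancel _ (by norm_num)]
      congr 1
      omega
  unfold pvA_k pvB_k
  rw [if_neg hcond, if_neg hcond]
  rw [hminbase]
  exact pv_k_core start end_ (10 ^ k.toNat) (PySem.Int.floordiv d k)
    (PySem.Int.floordiv (10 ^ d.toNat - 1) (10 ^ k.toNat - 1))
    (if k == 1 then (1 : Int) else PySem.Int.floordiv (10 ^ k.toNat) 10)
    (by omega) hm hm11 s

theorem pv_d_eq (start end_ : Int) : ∀ (d : Int) (s : PySem.Set Int),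
    pvA_d start end_ s d = pvB_d start end_ s d := by
  intro d s
  unfold pvA_d pvB_d
  refine PySem.List.foldl_congr_mem _ _ _ _ ?_
  intro acc k hk
  rw [PySem.List.mem_pyRange_one] at hk
  exact pv_k_eq start end_ d k (by omega) (by omega) acc

theorem find_invalid_in_range_part2_spec : Claim_equal_find_invalid_in_range_part2 := by
  intro start end_ _
  unfold Spec_find_invalid_in_range_part2 find_invalid_in_range_part2 find_invalid_in_range_part2_alt
  exact PySem.List.foldl_congr_mem _ _ _ _ (fun acc d _ => pv_d_eq start end_ d acc)
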